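-- pv_equiv track=rewrite | github.com/Sniggiho/MATH-494-Capstone-Project | ClassesLP.py | makeWMat
-- ===== SOURCE A (Python) =====
-- def makeWMat(listOfCourseNumbers):
--     weightsByNum = { # this controls how conflicts are weighted based on their course numbers
--         100100: 0,
--         100200: 2,
--         100300: 0,
--         100400: 0,
--         200200: 3,
--         200300: 3,
--         200400: 1,
--         300300: 4,
--         300400: 4,
--         400400: 3
--     }
--
--     wMat = [[0 for x in range(len(listOfCourseNumbers))] for y in range(len(listOfCourseNumbers))] # initializes the weight matrix with all 0s
--
--     for a in range(len(listOfCourseNumbers)): # TODO: super inelegant!!! exploit matrix symmetry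
--         for b in range(len(listOfCourseNumbers)):
--             aLevel = listOfCourseNumbers[a] - listOfCourseNumbers[a]%100
--
--             bLevel = listOfCourseNumbers[b] - listOfCourseNumbers[b]%100
--             key1 = 1000*aLevel + bLevel
--             key2 = 1000*bLevel + aLevel
--
--             if a == b:
--                 wMat[a][b] = 0
--             else:
--                 if listOfCourseNumbers[a] == listOfCourseNumbers[b]:
--                     wMat[a][b] = 5
--                 elif key1 in weightsByNum.keys():
--                     wMat[a][b] = weightsByNum[key1]
--
--                 elif key2 in weightsByNum.keys():
--                     wMat[a][b] = weightsByNum[key2]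
--
--     return wMat
-- ===== SOURCE B (Python) =====
-- def makeWMat(listOfCourseNumbers):
--     weightsByNum = {
--         100100: 0,
--         100200: 2,
--         100300: 0,
--         100400: 0,
--         200200: 3,
--         200300: 3,
--         200400: 1,
--         300300: 4,
--         300400: 4,
--         400400: 3
--     }
--     n = len(listOfCourseNumbers)
--     levels = [c - c % 100 for c in listOfCourseNumbers]
--
--     def weight(i, j):
--         if listOfCourseNumbers[i] == listOfCourseNumbers[j]:
--             return 5
--         key1 = 1000 * levels[i] + levels[j]
--         if key1 in weightsByNum:
--             return weightsByNum[key1]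
--         return weightsByNum.get(1000 * levels[j] + levels[i], 0)
--
--     rows = []
--     for i in range(n):
--         rows.append([rows[j][i] if j < i else 0 if j == i else weight(i, j)
--                      for j in range(n)])
--     return rows
-- ===== Notes on version B (the rewrite author's own statement) =====
-- stated objective: alternative
-- what changed: B precomputes each course's level once, builds the matrix row by row without mutation, computing each weight only for the upper triangle (j > i) and mirroring lower-triangle cells from the already-built rows, exploiting the matrix's symmetry; A re-derives both levels and probes both key orderings for every one of the n^2 cells of a mutable zero matrix.
import Mathlib
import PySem

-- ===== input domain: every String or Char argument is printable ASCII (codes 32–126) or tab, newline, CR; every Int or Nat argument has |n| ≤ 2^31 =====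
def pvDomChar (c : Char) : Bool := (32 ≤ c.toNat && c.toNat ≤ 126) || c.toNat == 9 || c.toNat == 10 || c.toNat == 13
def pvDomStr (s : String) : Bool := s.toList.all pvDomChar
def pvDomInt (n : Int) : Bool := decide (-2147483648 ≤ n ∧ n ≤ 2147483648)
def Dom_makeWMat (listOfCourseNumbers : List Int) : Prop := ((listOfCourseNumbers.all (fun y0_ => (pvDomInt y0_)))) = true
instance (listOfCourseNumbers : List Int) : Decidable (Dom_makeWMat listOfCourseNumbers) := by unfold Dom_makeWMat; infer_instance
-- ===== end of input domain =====

-- B builds the weight matrix row by row without mutation, computing levels once and each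
-- pair weight only for j > i, mirroring the lower triangle from the already-built rows.

set_option maxHeartbeats 1000000
set_option maxRecDepth 4000

-- ===== PORT A =====
def wDictA : PySem.Dict Int Int := PySem.Dict.ofList
  [(100100, 0), (100200, 2), (100300, 0), (100400, 0), (200200, 3),
   (200300, 3), (200400, 1), (300300, 4), (300400, 4), (400400, 3)]

-- wMat[a][b] = v  (a, b are in range in every use below)
def pySet2 (m : List (List Int)) (a b : Int) (v : Int) : List (List Int) :=
  PySem.List.pySetD m a (PySem.List.pySetD (PySem.List.pyGetD m a []) b v)

def makeWMat (listOfCourseNumbers : List Int) : List (List Int) :=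
  let n : Int := (listOfCourseNumbers.length : Int)
  let wMat0 := (PySem.List.pyRange 0 n 1).map (fun _ => (PySem.List.pyRange 0 n 1).map (fun _ => (0 : Int)))
  (PySem.List.pyRange 0 n 1).foldl (fun wMat a =>
    (PySem.List.pyRange 0 n 1).foldl (fun wMat b =>
      let xa := PySem.List.pyGetD listOfCourseNumbers a 0
      let xb := PySem.List.pyGetD listOfCourseNumbers b 0
      let aLevel := xa - PySem.Int.mod xa 100
      let bLevel := xb - PySem.Int.mod xb 100
      let key1 := 1000 * aLevel + bLevel
      let key2 := 1000 * bLevel + aLevel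
      if a = b then pySet2 wMat a b 0
      else if xa = xb then pySet2 wMat a b 5
      else if wDictA.contains key1 then pySet2 wMat a b (wDictA.getD key1 0)
      else if wDictA.contains key2 then pySet2 wMat a b (wDictA.getD key2 0)
      else wMat) wMat) wMat0

-- ===== PORT B =====
def wDictB : PySem.Dict Int Int := PySem.Dict.ofList
  [(100100, 0), (100200, 2), (100300, 0), (100400, 0), (200200, 3),
   (200300, 3), (200400, 1), (300300, 4), (300400, 4), (400400, 3)]

def makeWMat_alt (listOfCourseNumbers : List Int) : List (List Int) :=
  let n : Int := (listOfCourseNumbers.length : Int)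
  let levels := listOfCourseNumbers.map (fun c => c - PySem.Int.mod c 100)
  let weight : Int → Int → Int := fun i j =>
    if PySem.List.pyGetD listOfCourseNumbers i 0 = PySem.List.pyGetD listOfCourseNumbers j 0 then 5
    else
      let key1 := 1000 * PySem.List.pyGetD levels i 0 + PySem.List.pyGetD levels j 0
      if wDictB.contains key1 then wDictB.getD key1 0
      else wDictB.getD (1000 * PySem.List.pyGetD levels j 0 + PySem.List.pyGetD levels i 0) 0
  (PySem.List.pyRange 0 n 1).foldl (fun rows i =>
    rows ++ [(PySem.List.pyRange 0 n 1).map (fun j =>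
      if j < i then PySem.List.pyGetD (PySem.List.pyGetD rows j []) i 0
      else if j = i then 0
      else weight i j)]) []

-- ===== PRECONDITION & SPEC =====
def Spec_makeWMat (listOfCourseNumbers : List Int) (out : List (List Int)) : Prop := out = makeWMat_alt listOfCourseNumbers
instance (listOfCourseNumbers : List Int) (out : List (List Int)) : Decidable (Spec_makeWMat listOfCourseNumbers out) := by unfold Spec_makeWMat; infer_instance

-- ===== CLAIM (what is proved, stated in full; the proofs are below) =====
def Claim_equal_makeWMat : Prop := ∀ (listOfCourseNumbers : List Int), Dom_makeWMat listOfCourseNumbers → Spec_makeWMat listOfCourseNumbers (makeWMat listOfCourseNumbers)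

-- ===== LEMMAS AND PROOFS =====

-- course level, the else-chain over the two key orderings, and the resulting cell value
def pvLvl (c : Int) : Int := c - PySem.Int.mod c 100

def pvChain (p q : Int) : Int :=
  if wDictA.contains (1000 * p + q) then wDictA.getD (1000 * p + q) 0
  else wDictA.getD (1000 * q + p) 0

def pvCell (xs : List Int) (a b : Nat) : Int :=
  if a = b then 0
  else if xs.getD a 0 = xs.getD b 0 then 5
  else pvChain (pvLvl (xs.getD a 0)) (pvLvl (xs.getD b 0))

def pvRowF (xs : List Int) (a : Nat) : List Int :=
  (List.range xs.length).map (fun b => pvCell xs a b)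

def pvRowZ (n : Nat) : List Int := (List.range n).map (fun _ => (0 : Int))

def pvMix (xs : List Int) (a k : Nat) : List Int :=
  (List.range xs.length).map (fun b => if b < k then pvCell xs a b else 0)

def pvG (k : Int) : Int :=
  if k = 100200 then 2 else if k = 200200 then 3 else if k = 200300 then 3
  else if k = 200400 then 1 else if k = 300300 then 4 else if k = 300400 then 4
  else if k = 400400 then 3 else 0

theorem wDictA_contains (k : Int) :
    wDictA.contains k = decide (k = 100100 ∨ k = 100200 ∨ k = 100300 ∨ k = 100400 ∨ k = 200200 ∨
      k = 200300 ∨ k = 200400 ∨ k = 300300 ∨ k = 300400 ∨ k = 400400) := by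
  have h : wDictA = PySem.Dict.mk [(100100, 0), (100200, 2), (100300, 0), (100400, 0), (200200, 3),
   (200300, 3), (200400, 1), (300300, 4), (300400, 4), (400400, 3)] := by rfl
  rw [h, PySem.Dict.contains_mk]
  apply Bool.eq_iff_iff.mpr
  simp [List.any_cons]
  tauto

theorem wDictA_getD (k : Int) : wDictA.getD k 0 = pvG k := by
  have h : wDictA = PySem.Dict.mk [(100100, 0), (100200, 2), (100300, 0), (100400, 0), (200200, 3),
   (200300, 3), (200400, 1), (300300, 4), (300400, 4), (400400, 3)] := by rfl
  rw [PySem.Dict.getD_eq_get?_getD, h]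
  simp only [PySem.Dict.get?_mk_cons, beq_iff_eq]
  unfold pvG
  split_ifs <;> first | rfl | omega

theorem pvChain_symm (p q : Int) : pvChain p q = pvChain q p := by
  unfold pvChain
  rw [wDictA_contains, wDictA_contains, wDictA_getD, wDictA_getD]
  simp only [decide_eq_true_eq]
  by_cases h1 : (1000 * p + q = 100100 ∨ 1000 * p + q = 100200 ∨ 1000 * p + q = 100300 ∨
      1000 * p + q = 100400 ∨ 1000 * p + q = 200200 ∨ 1000 * p + q = 200300 ∨
      1000 * p + q = 200400 ∨ 1000 * p + q = 300300 ∨ 1000 * p + q = 300400 ∨ 1000 * p + q = 400400) <;>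
    by_cases h2 : (1000 * q + p = 100100 ∨ 1000 * q + p = 100200 ∨ 1000 * q + p = 100300 ∨
      1000 * q + p = 100400 ∨ 1000 * q + p = 200200 ∨ 1000 * q + p = 200300 ∨
      1000 * q + p = 200400 ∨ 1000 * q + p = 300300 ∨ 1000 * q + p = 300400 ∨ 1000 * q + p = 400400) <;>
    simp only [h1, h2, ite_true, ite_false, if_pos, if_neg, not_false_iff]
  · rcases h1 with h|h|h|h|h|h|h|h|h|h <;> rcases h2 with h'|h'|h'|h'|h'|h'|h'|h'|h'|h' <;>
      rw [h, h'] <;> first | decide | omega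
  · push_neg at h1 h2
    unfold pvG
    split_ifs <;> omega

theorem pvCell_symm (xs : List Int) (a b : Nat) : pvCell xs a b = pvCell xs b a := by
  unfold pvCell
  by_cases h : a = b
  · simp [h]
  · by_cases h2 : xs.getD a 0 = xs.getD b 0
    · rw [if_neg h, if_neg (Ne.symm h), if_pos h2, if_pos h2.symm]
    · rw [if_neg h, if_neg (Ne.symm h), if_neg h2, if_neg (fun e => h2 e.symm), pvChain_symm]

theorem getD_map_range' {α : Type} (n k : Nat) (f : Nat → α) (d : α) (hk : k < n) :
    ((List.range n).map f).getD k d = f k := by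
  rw [List.getD_eq_getElem _ _ (by simpa using hk)]
  simp

theorem set_map_range {α : Type} (n k : Nat) (f : Nat → α) (v : α) (hk : k < n) :
    ((List.range n).map f).set k v = (List.range n).map (fun x => if x = k then v else f x) := by
  apply List.ext_getElem
  · simp
  · intro i h1 h2
    by_cases hik : i = k
    · subst hik
      rw [List.getElem_set_self]
      simp
    · rw [List.getElem_set_ne (fun e => hik e.symm)]
      simp [hik]

-- the inner-loop body of A, as a named function (definitionally the port's body)
def bodyA (xs : List Int) (a : Int) (wMat : List (List Int)) (b : Int) : List (List Int) :=
  let xa := PySem.List.pyGetD xs a 0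
  let xb := PySem.List.pyGetD xs b 0
  let aLevel := xa - PySem.Int.mod xa 100
  let bLevel := xb - PySem.Int.mod xb 100
  let key1 := 1000 * aLevel + bLevel
  let key2 := 1000 * bLevel + aLevel
  if a = b then pySet2 wMat a b 0
  else if xa = xb then pySet2 wMat a b 5
  else if wDictA.contains key1 then pySet2 wMat a b (wDictA.getD key1 0)
  else if wDictA.contains key2 then pySet2 wMat a b (wDictA.getD key2 0)
  else wMat

theorem makeWMat_def (xs : List Int) :
    makeWMat xs = (PySem.List.pyRange 0 (xs.length : Int) 1).foldl (fun wMat a =>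
      (PySem.List.pyRange 0 (xs.length : Int) 1).foldl (bodyA xs a) wMat)
      ((PySem.List.pyRange 0 (xs.length : Int) 1).map (fun _ =>
        (PySem.List.pyRange 0 (xs.length : Int) 1).map (fun _ => (0 : Int)))) := rfl

theorem bodyA_eq (xs : List Int) (a b : Nat) (M : List (List Int)) (ha : a < M.length)
    (hb : b < (M.getD a []).length) (h0 : (M.getD a []).getD b 0 = 0) :
    bodyA xs (a : Int) M (b : Int) = M.set a ((M.getD a []).set b (pvCell xs a b)) := by
  have hget : PySem.List.pyGetD M (a : Int) [] = M.getD a [] := PySem.List.pyGetD_natCast M a []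
  unfold bodyA pySet2
  simp only [hget, PySem.List.pyGetD_natCast, PySem.List.pySetD_natCast, Nat.cast_inj]
  unfold pvCell pvChain pvLvl
  split_ifs with h1 h2 h3 h4
  · rfl
  · rfl
  · rfl
  · rfl
  · -- nothing is written; the current entry is 0 and the intended value is 0 too
    rw [wDictA_contains] at h4
    simp only [decide_eq_true_eq] at h4
    push_neg at h4
    have hz : pvG (1000 * (xs.getD b 0 - PySem.Int.mod (xs.getD b 0) 100) +
        (xs.getD a 0 - PySem.Int.mod (xs.getD a 0) 100)) = 0 := by
      unfold pvG; split_ifs <;> omega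
    rw [wDictA_getD, hz]
    rw [List.getD_eq_getElem _ _ hb] at h0
    rw [← h0, List.set_getElem_self hb, List.getD_eq_getElem _ _ ha, List.set_getElem_self ha]

theorem innerA (xs : List Int) (a : Nat) (ha : a < xs.length) (M : List (List Int))
    (hlen : M.length = xs.length) (hrow : M.getD a [] = pvRowZ xs.length) :
    ∀ k, k ≤ xs.length →
      ((List.range k).map (fun b : Nat => (b : Int))).foldl (bodyA xs (a : Int)) M
        = M.set a (pvMix xs a k) := by
  intro k
  induction k with
  | zero =>
    intro _
    have : pvMix xs a 0 = M.getD a [] := by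
      rw [hrow]; unfold pvMix pvRowZ; simp
    rw [this, List.range_zero, List.map_nil, List.foldl_nil,
      List.getD_eq_getElem _ _ (by omega), List.set_getElem_self (by omega)]
  | succ k ih =>
    intro hk
    rw [List.range_succ, List.map_append, List.foldl_append, ih (by omega)]
    simp only [List.map_cons, List.map_nil]
    have hM' : (M.set a (pvMix xs a k)).getD a [] = pvMix xs a k := by
      rw [List.getD_eq_getElem _ _ (by simp; omega), List.getElem_set_self]
    have hmixlen : (pvMix xs a k).length = xs.length := by unfold pvMix; simp
    rw [List.foldl_cons, List.foldl_nil,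
      bodyA_eq xs a k _ (by simp; omega) (by rw [hM', hmixlen]; omega)
        (by rw [hM']; unfold pvMix; rw [getD_map_range' _ _ _ _ (by omega)]; simp),
      hM', List.set_set]
    congr 1
    unfold pvMix
    rw [set_map_range _ _ _ _ (by omega)]
    apply List.map_congr_left
    intro x _
    by_cases hxk : x = k
    · subst hxk
      rw [if_pos rfl, if_pos (Nat.lt_succ_self x)]
    · rw [if_neg hxk]
      split_ifs <;> first | rfl | omega

theorem outerA (xs : List Int) :
    ∀ k, k ≤ xs.length →
      ((List.range k).map (fun a : Nat => (a : Int))).foldl (fun wMat a =>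
          ((List.range xs.length).map (fun b : Nat => (b : Int))).foldl (bodyA xs a) wMat)
        ((List.range xs.length).map (fun _ => pvRowZ xs.length))
      = (List.range xs.length).map (fun x => if x < k then pvRowF xs x else pvRowZ xs.length) := by
  intro k
  induction k with
  | zero =>
    intro _
    simp
  | succ k ih =>
    intro hk
    rw [List.range_succ, List.map_append, List.foldl_append, ih (by omega),
      List.map_cons, List.map_nil, List.foldl_cons, List.foldl_nil]
    have hlen : ((List.range xs.length).map
        (fun x => if x < k then pvRowF xs x else pvRowZ xs.length)).length = xs.length := by simp
    rw [innerA xs k (by omega) _ hlen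
      (by rw [getD_map_range' _ _ _ _ (by omega)]; simp) xs.length (le_refl _)]
    rw [set_map_range _ _ _ _ (by omega)]
    apply List.map_congr_left
    intro x hx
    by_cases hxk : x = k
    · subst hxk
      have : pvMix xs x xs.length = pvRowF xs x := by
        unfold pvMix pvRowF
        apply List.map_congr_left
        intro b hb
        rw [if_pos (List.mem_range.mp hb)]
      simp [this]
    · simp only [if_neg hxk]
      split_ifs <;> first | rfl | omega

theorem makeWMat_eq (xs : List Int) :
    makeWMat xs = (List.range xs.length).map (fun a => pvRowF xs a) := by
  rw [makeWMat_def]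
  simp only [PySem.List.pyRange_zero_natCast, List.map_map]
  have hz : (List.range xs.length).map ((fun _ => (List.range xs.length).map
        ((fun _ => (0:Int)) ∘ (fun k : Nat => (k:Int)))) ∘ (fun k : Nat => (k:Int)))
      = (List.range xs.length).map (fun _ => pvRowZ xs.length) := by
    unfold pvRowZ
    simp [Function.comp_def]
  rw [hz]
  rw [outerA xs xs.length (le_refl _)]
  apply List.map_congr_left
  intro x hx
  rw [if_pos (List.mem_range.mp hx)]

-- the loop body of B, as a named function (definitionally the port's body)
def pvLevels (xs : List Int) : List Int := xs.map (fun c => c - PySem.Int.mod c 100)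

def weightB (xs : List Int) (i j : Int) : Int :=
  if PySem.List.pyGetD xs i 0 = PySem.List.pyGetD xs j 0 then 5
  else
    let key1 := 1000 * PySem.List.pyGetD (pvLevels xs) i 0 + PySem.List.pyGetD (pvLevels xs) j 0
    if wDictB.contains key1 then wDictB.getD key1 0
    else wDictB.getD (1000 * PySem.List.pyGetD (pvLevels xs) j 0 + PySem.List.pyGetD (pvLevels xs) i 0) 0

def bodyB (xs : List Int) (rows : List (List Int)) (i : Int) : List (List Int) :=
  rows ++ [(PySem.List.pyRange 0 (xs.length : Int) 1).map (fun j =>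
    if j < i then PySem.List.pyGetD (PySem.List.pyGetD rows j []) i 0
    else if j = i then 0
    else weightB xs i j)]

theorem makeWMat_alt_def (xs : List Int) :
    makeWMat_alt xs = (PySem.List.pyRange 0 (xs.length : Int) 1).foldl (bodyB xs) [] := rfl

theorem weightB_eq (xs : List Int) (i j : Nat) (hi : i < xs.length) (hj : j < xs.length)
    (hij : i ≠ j) : weightB xs (i : Int) (j : Int) = pvCell xs i j := by
  have hBA : wDictB = wDictA := rfl
  have hlev : ∀ m : Nat, m < xs.length →
      (pvLevels xs).getD m 0 = pvLvl (xs.getD m 0) := by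
    intro m hm
    unfold pvLevels pvLvl
    rw [List.getD_eq_getElem _ _ (by simpa using hm), List.getElem_map,
      List.getD_eq_getElem _ _ hm]
  unfold weightB
  simp only [hBA, PySem.List.pyGetD_natCast, hlev i hi, hlev j hj]
  unfold pvCell pvChain
  rw [if_neg hij]

theorem bLoop (xs : List Int) :
    ∀ k, k ≤ xs.length →
      ((List.range k).map (fun a : Nat => (a : Int))).foldl (bodyB xs) []
        = (List.range k).map (fun a => pvRowF xs a) := by
  intro k
  induction k with
  | zero => intro _; simp
  | succ k ih =>
    intro hk
    rw [List.range_succ, List.map_append, List.foldl_append, ih (by omega),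
      List.map_cons, List.map_nil, List.foldl_cons, List.foldl_nil]
    unfold bodyB
    rw [List.map_append]
    congr 1
    rw [PySem.List.pyRange_zero_natCast, List.map_map]
    simp only [List.map_cons, List.map_nil]
    congr 1
    unfold pvRowF
    apply List.map_congr_left
    intro j hj
    have hjn : j < xs.length := List.mem_range.mp hj
    simp only [Function.comp_apply]
    by_cases hlt : j < k
    · rw [if_pos (by exact_mod_cast hlt)]
      simp only [PySem.List.pyGetD_natCast]
      rw [getD_map_range' _ _ _ _ hlt, getD_map_range' _ _ _ _ (show k < xs.length by omega)]
      exact pvCell_symm xs j k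
    · by_cases heq : j = k
      · subst heq
        rw [if_neg (by exact_mod_cast hlt), if_pos rfl]
        unfold pvCell
        rw [if_pos rfl]
      · rw [if_neg (by exact_mod_cast hlt), if_neg (by exact_mod_cast heq)]
        exact weightB_eq xs k j (by omega) hjn (fun e => heq e.symm)

theorem makeWMat_alt_eq (xs : List Int) :
    makeWMat_alt xs = (List.range xs.length).map (fun a => pvRowF xs a) := by
  rw [makeWMat_alt_def, PySem.List.pyRange_zero_natCast]
  exact bLoop xs xs.length (le_refl _)

-- ===== VERDICT (by name: the statement is the Claim_ definition above) =====
theorem makeWMat_spec : Claim_equal_makeWMat := by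
  intro xs _
  unfold Spec_makeWMat
  rw [makeWMat_eq, makeWMat_alt_eq]
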